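-- pv_equiv track=rewrite | github.com/Shashwat-Akhilesh-Shukla/PitchPilot | utils/context_prioritization.py | prioritize_context
-- ===== SOURCE A (Python) =====
-- from typing import Dict, List, Any
--
-- def prioritize_context(context_items: List[str], startup_info: Dict[str, str]) -> List[str]:
--     """
--     Prioritize context items based on relevance to startup info.
--
--     Args:
--         context_items: List of context items
--         startup_info: Dictionary containing information about the startup
--
--     Returns:
--         Prioritized list of context items
--     """
--     # This is a simplified implementation
--     # In a real system, this would use sophisticated relevance scoring
--
--     # Convert startup info to a single string for comparison
--     startup_text = " ".join(startup_info.values())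
--
--     # Score each context item by counting overlapping terms
--     scored_items = []
--     for item in context_items:
--         # Count how many words from startup_text appear in the item
--         words = set(startup_text.lower().split())
--         item_words = set(item.lower().split())
--         overlap = len(words.intersection(item_words))
--
--         scored_items.append((item, overlap))
--
--     # Sort by score (highest first)
--     scored_items.sort(key=lambda x: x[1], reverse=True)
--
--     # Return the prioritized items
--     return [item for item, _ in scored_items]
-- ===== SOURCE B (Python) =====
-- def prioritize_context(context_items, startup_info):
--     """Group-by-score pass instead of a comparison sort: compute the startup
--     word-set once, score each item, then emit items score by score from the
--     highest possible score down to 0, preserving input order within a score."""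
--     startup_words = set(" ".join(startup_info.values()).lower().split())
--     scores = [len(startup_words.intersection(set(item.lower().split())))
--               for item in context_items]
--     result = []
--     for s in range(len(startup_words), -1, -1):
--         result.extend(item for item, sc in zip(context_items, scores) if sc == s)
--     return result
-- ===== Notes on version B (the rewrite author's own statement) =====
-- stated objective: faster
-- what changed: B replaces A's per-item rebuild of the startup word-set plus a stable descending comparison sort with a single word-set build, one scoring pass, and emitting score groups from the maximum possible score down to 0 (bucket/counting-style grouping, no sort).
import Mathlib
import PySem

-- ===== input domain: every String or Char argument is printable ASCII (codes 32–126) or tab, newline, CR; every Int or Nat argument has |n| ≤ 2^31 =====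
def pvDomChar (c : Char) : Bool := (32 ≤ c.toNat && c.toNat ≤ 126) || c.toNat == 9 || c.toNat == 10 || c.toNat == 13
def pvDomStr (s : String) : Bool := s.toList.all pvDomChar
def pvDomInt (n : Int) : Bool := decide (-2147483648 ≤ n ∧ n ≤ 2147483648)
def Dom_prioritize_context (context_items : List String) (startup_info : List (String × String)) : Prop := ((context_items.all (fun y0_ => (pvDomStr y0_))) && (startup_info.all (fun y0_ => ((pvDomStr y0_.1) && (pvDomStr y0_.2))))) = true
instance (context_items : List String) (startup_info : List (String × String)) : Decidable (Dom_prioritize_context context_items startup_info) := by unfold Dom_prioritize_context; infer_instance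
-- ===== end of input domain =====

-- B replaces A's stable reverse sort (which also rebuilds the startup word-set per item)
-- with a single scoring pass followed by emitting score groups from high to low (objective: alternative).


-- ===== PORT A =====
-- A: score every item by word overlap with the startup text (rebuilding the startup
-- word-set inside the loop, as the Python does), stable-sort by score descending, map fst.
def prioritize_context (context_items : List String) (startup_info : List (String × String)) : List String :=
  let startup_text := PySem.Str.join " " (PySem.Dict.values (PySem.Dict.ofList startup_info))
  let scored_items := context_items.foldl (fun acc item =>
      let words := PySem.Set.ofList (PySem.Str.split₀ (PySem.Str.lower startup_text))
      let item_words := PySem.Set.ofList (PySem.Str.split₀ (PySem.Str.lower item))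
      let overlap := PySem.Set.len (PySem.Set.inter words item_words)
      acc ++ [(item, overlap)]) ([] : List (String × Int))
  (PySem.List.sorted scored_items (fun x => x.2) true).map (fun p => p.1)

-- ===== PORT B =====
-- B: one scoring pass, then for s = len(startup_words) … 0 append the items whose score is s.
def prioritize_context_alt (context_items : List String) (startup_info : List (String × String)) : List String :=
  let startup_words := PySem.Set.ofList (PySem.Str.split₀ (PySem.Str.lower
      (PySem.Str.join " " (PySem.Dict.values (PySem.Dict.ofList startup_info)))))
  let scores := context_items.map (fun item =>
      PySem.Set.len (PySem.Set.inter startup_words (PySem.Set.ofList (PySem.Str.split₀ (PySem.Str.lower item)))))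
  (PySem.List.pyRange (PySem.Set.len startup_words) (-1) (-1)).foldl
    (fun result s =>
      result ++ ((context_items.zip scores).filter (fun p => p.2 == s)).map (fun p => p.1)) []

-- ===== PRECONDITION & SPEC =====
def Spec_prioritize_context (context_items : List String) (startup_info : List (String × String)) (out : List String) : Prop := out = prioritize_context_alt context_items startup_info
instance (context_items : List String) (startup_info : List (String × String)) (out : List String) : Decidable (Spec_prioritize_context context_items startup_info out) := by unfold Spec_prioritize_context; infer_instance

-- ===== CLAIM (what is proved, stated in full; the proofs are below) =====
def Claim_equal_prioritize_context : Prop := ∀ (context_items : List String) (startup_info : List (String × String)), Dom_prioritize_context context_items startup_info → Spec_prioritize_context context_items startup_info (prioritize_context context_items startup_info)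

-- ===== LEMMAS AND PROOFS =====

-- inserting past a prefix it does not go before
theorem pvInsertBy_append_of_not {α : Type} (before : α → α → Bool) (x : α) (pre post : List α)
    (h : ∀ y ∈ pre, before x y = false) :
    PySem.List.insertBy before x (pre ++ post) = pre ++ PySem.List.insertBy before x post := by
  induction pre with
  | nil => simp
  | cons y ys ih =>
    simp only [List.cons_append, PySem.List.insertBy, h y (by simp)]
    simp only [Bool.false_eq_true, if_false]
    rw [ih (fun z hz => h z (by simp [hz]))]

-- inserting before everything
theorem pvInsertBy_of_all_before {α : Type} (before : α → α → Bool) (x : α) (l : List α)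
    (h : ∀ y ∈ l, before x y = true) :
    PySem.List.insertBy before x l = x :: l := by
  cases l with
  | nil => rfl
  | cons y ys => simp [PySem.List.insertBy, h y (by simp)]

-- inserting an element into the score-bucket concatenation appends it to its bucket
theorem pvInsert_flatMap {α : Type} (key : α → Int) (x : α) :
    ∀ (ss : List Int) (xs : List α), ss.Pairwise (fun a b => b < a) → key x ∈ ss →
    PySem.List.insertBy (fun a b => decide (key b < key a)) x
        (ss.flatMap (fun s => xs.filter (fun y => key y == s)))
      = ss.flatMap (fun s => (xs ++ [x]).filter (fun y => key y == s)) := by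
  intro ss
  induction ss with
  | nil => intro xs _ hx; simp at hx
  | cons s ss ih =>
    intro xs hp hx
    have hlt : ∀ t ∈ ss, t < s := fun t ht => (List.pairwise_cons.mp hp).1 t ht
    simp only [List.flatMap_cons]
    by_cases hxs : key x = s
    · -- x goes to the end of the first bucket, before all later (smaller-key) buckets
      rw [pvInsertBy_append_of_not _ x _ _ (by
        intro y hy
        have := List.of_mem_filter hy
        simp only [beq_iff_eq] at this
        simp [this, hxs])]
      rw [pvInsertBy_of_all_before _ x _ (by
        intro y hy
        rcases List.mem_flatMap.mp hy with ⟨t, ht, hyt⟩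
        have := List.of_mem_filter hyt
        simp only [beq_iff_eq] at this
        simp [this, hxs, hlt t ht])]
      have hbuckets : ss.flatMap (fun t => (xs ++ [x]).filter (fun y => key y == t))
          = ss.flatMap (fun t => xs.filter (fun y => key y == t)) := by
        apply List.flatMap_congr
        intro t ht
        have : key x ≠ t := by rw [hxs]; exact ne_of_gt (hlt t ht)
        simp [List.filter_append, this]
      rw [hbuckets]
      simp [List.filter_append, hxs]
    · -- x's bucket is further on
      have hx' : key x ∈ ss := by
        rcases hx with _ | h
        · exact absurd rfl hxs
        · assumption
      rw [pvInsertBy_append_of_not _ x _ _ (by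
        intro y hy
        have := List.of_mem_filter hy
        simp only [beq_iff_eq] at this
        have : key y = s := this
        simp [this, not_lt.mpr (le_of_lt (hlt _ hx'))])]
      rw [ih xs (List.pairwise_cons.mp hp).2 hx']
      simp [List.filter_append, hxs]

-- stable descending sort equals the high-to-low score-bucket concatenation
theorem pvSorted_rev_eq_flatMap {α : Type} (key : α → Int) (ss : List Int)
    (hp : ss.Pairwise (fun a b => b < a)) :
    ∀ (xs : List α), (∀ x ∈ xs, key x ∈ ss) →
    PySem.List.sorted xs key true = ss.flatMap (fun s => xs.filter (fun y => key y == s)) := by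
  intro xs
  induction xs using List.reverseRecOn with
  | nil => simp [PySem.List.sorted_rev_eq_foldl_insertBy]
  | append_singleton xs x ih =>
    intro h
    rw [PySem.List.sorted_rev_eq_foldl_insertBy, List.foldl_append, List.foldl_cons, List.foldl_nil,
        ← PySem.List.sorted_rev_eq_foldl_insertBy,
        ih (fun y hy => h y (by simp [hy])),
        pvInsert_flatMap key x ss xs hp (h x (by simp))]

-- ===== VERDICT (by name: the statement is the Claim_ definition above) =====
set_option maxHeartbeats 1000000 in
theorem prioritize_context_spec : Claim_equal_prioritize_context := by
  intro context_items startup_info _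
  unfold Spec_prioritize_context
  simp only [prioritize_context, prioritize_context_alt]
  set W := PySem.Set.ofList (PySem.Str.split₀ (PySem.Str.lower
      (PySem.Str.join " " (PySem.Dict.values (PySem.Dict.ofList startup_info))))) with hW
  set sc : String → Int := fun item =>
      PySem.Set.len (PySem.Set.inter W (PySem.Set.ofList (PySem.Str.split₀ (PySem.Str.lower item)))) with hsc
  rw [PySem.List.foldl_append_singleton_eq_map, PySem.List.foldl_append_eq_flatMap]
  simp only [List.nil_append]
  have hpair : (PySem.List.pyRange (PySem.Set.len W) (-1) (-1)).Pairwise (fun a b : Int => b < a) := by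
    rw [PySem.List.pyRange_neg_one_eq_reverse]
    exact List.pairwise_reverse.mpr (PySem.List.pairwise_lt_pyRange_one 0 (PySem.Set.len W + 1))
  have hmem : ∀ p ∈ context_items.map (fun item => (item, sc item)),
      (fun p : String × Int => p.2) p ∈ PySem.List.pyRange (PySem.Set.len W) (-1) (-1) := by
    intro p hp
    rcases List.mem_map.mp hp with ⟨item, _, rfl⟩
    rw [PySem.List.mem_pyRange_neg_one]
    constructor
    · exact lt_of_lt_of_le (by norm_num) (Int.natCast_nonneg _)
    · exact Int.ofNat_le.mpr (List.length_filter_le _ W)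
  rw [pvSorted_rev_eq_flatMap (fun p : String × Int => p.2) _ hpair _ hmem, List.map_flatMap]
  have hzip : context_items.zip (context_items.map sc) = context_items.map (fun a => (a, sc a)) := by
    simpa using (List.zip_map' (f := id) (g := sc) (l := context_items))
  rw [hzip]
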